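-- pv_equiv track=rewrite | github.com/groberthughes/Python---Data-Visualization | finalGraphs.py | calculateTotalBinSales
-- ===== SOURCE A (Python) =====
-- def calculateTotalBinSales(devSeries):
-- 	out = []
-- 	for i in range(5):
-- 		total = 0
-- 		for developer in devSeries:
-- 			total += int(developer[i])
-- 		out.append(total)
-- 	return out
-- ===== SOURCE B (Python) =====
-- def calculateTotalBinSales(devSeries):
--     if not devSeries:
--         return [0, 0, 0, 0, 0]
--     if len(devSeries) == 1:
--         row = devSeries[0]
--         return [int(row[i]) for i in range(5)]
--     mid = len(devSeries) // 2
--     left = calculateTotalBinSales(devSeries[:mid])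
--     right = calculateTotalBinSales(devSeries[mid:])
--     return [left[i] + right[i] for i in range(5)]
-- ===== Notes on version B (the rewrite author's own statement) =====
-- stated objective: alternative
-- what changed: Divide-and-conquer: recursively split devSeries in half, compute the 5 column sums of each half, and add the two 5-vectors pointwise, instead of A's five separate iterative full scans of devSeries (one per column).
import Mathlib
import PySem

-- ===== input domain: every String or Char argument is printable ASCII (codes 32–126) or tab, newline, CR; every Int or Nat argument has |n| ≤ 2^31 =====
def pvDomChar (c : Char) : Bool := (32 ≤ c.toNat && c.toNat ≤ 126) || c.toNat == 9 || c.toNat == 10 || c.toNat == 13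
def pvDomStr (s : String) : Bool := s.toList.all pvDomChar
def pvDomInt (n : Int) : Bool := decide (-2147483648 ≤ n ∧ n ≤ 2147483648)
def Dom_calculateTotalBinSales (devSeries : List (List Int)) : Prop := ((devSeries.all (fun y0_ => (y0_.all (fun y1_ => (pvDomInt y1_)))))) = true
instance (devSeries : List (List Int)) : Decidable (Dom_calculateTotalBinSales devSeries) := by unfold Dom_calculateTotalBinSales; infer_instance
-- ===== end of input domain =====

-- B replaces A's five iterative full scans (one per column) by a divide-and-conquer
-- recursion: split the list in half, sum each half's columns, add the 5-vectors pointwise.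
-- Same asymptotic cost; a genuinely different (recursive) algorithm.

-- ===== PORT A =====
def calculateTotalBinSales (devSeries : List (List Int)) : List Int :=
  (PySem.List.pyRange 0 5 1).foldl (fun out i =>
    out ++ [devSeries.foldl (fun total developer =>
      total + (PySem.List.pyGet? developer i).getD 0) 0]) []

-- ===== PORT B =====
def calculateTotalBinSales_alt (devSeries : List (List Int)) : List Int :=
  if h0 : devSeries = [] then [0, 0, 0, 0, 0]
  else if h1 : devSeries.length = 1 then
    let row := (PySem.List.pyGet? devSeries 0).getD []
    (PySem.List.pyRange 0 5 1).map (fun i => (PySem.List.pyGet? row i).getD 0)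
  else
    -- len(devSeries)//2 on the nonnegative length is exactly Nat division
    let mid : Nat := devSeries.length / 2
    let left := calculateTotalBinSales_alt (PySem.List.slice devSeries none (some (mid : Int)))
    let right := calculateTotalBinSales_alt (PySem.List.slice devSeries (some (mid : Int)) none)
    (PySem.List.pyRange 0 5 1).map (fun i =>
      (PySem.List.pyGet? left i).getD 0 + (PySem.List.pyGet? right i).getD 0)
termination_by devSeries.length
decreasing_by
  · rw [PySem.List.slice_to_natCast]
    simp only [List.length_take]
    have h2 : devSeries.length ≠ 0 := by simpa using h0
    omega
  · rw [PySem.List.slice_from_natCast]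
    simp only [List.length_drop]
    have h2 : devSeries.length ≠ 0 := by simpa using h0
    omega

-- ===== PRECONDITION & SPEC =====
-- Pre_ excludes exactly the inputs where both Pythons raise IndexError: some row shorter than 5.
def Pre_calculateTotalBinSales (devSeries : List (List Int)) : Prop :=
  ∀ row ∈ devSeries, 5 ≤ row.length
instance (devSeries : List (List Int)) : Decidable (Pre_calculateTotalBinSales devSeries) := by
  unfold Pre_calculateTotalBinSales; infer_instance
def pvWitness_calculateTotalBinSales : List (List Int) := [[1, 2, 3, 4, 5]]

def Spec_calculateTotalBinSales (devSeries : List (List Int)) (out : List Int) : Prop := out = calculateTotalBinSales_alt devSeries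
instance (devSeries : List (List Int)) (out : List Int) : Decidable (Spec_calculateTotalBinSales devSeries out) := by unfold Spec_calculateTotalBinSales; infer_instance

-- ===== CLAIM (what is proved, stated in full; the proofs are below) =====
def Claim_equal_calculateTotalBinSales : Prop := ∀ (devSeries : List (List Int)), Dom_calculateTotalBinSales devSeries → Pre_calculateTotalBinSales devSeries → Spec_calculateTotalBinSales devSeries (calculateTotalBinSales devSeries)

-- ===== LEMMAS AND PROOFS =====

def pvCol (i : Int) (row : List Int) : Int := (PySem.List.pyGet? row i).getD 0

def pvSums (rows : List (List Int)) : List Int :=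
  [(rows.map (pvCol 0)).sum, (rows.map (pvCol 1)).sum, (rows.map (pvCol 2)).sum,
   (rows.map (pvCol 3)).sum, (rows.map (pvCol 4)).sum]

lemma pvRange5 : PySem.List.pyRange 0 5 1 = [0, 1, 2, 3, 4] := by decide

lemma pvAfold (rows : List (List Int)) (i : Int) :
    rows.foldl (fun total developer => total + (PySem.List.pyGet? developer i).getD 0) 0
      = (rows.map (pvCol i)).sum := by
  rw [PySem.List.foldl_add, zero_add]
  rfl

lemma pvA_eq (rows : List (List Int)) : calculateTotalBinSales rows = pvSums rows := by
  unfold calculateTotalBinSales pvSums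
  simp [pvRange5, List.foldl, pvAfold]

lemma pvSums_append (l r : List (List Int)) :
    pvSums (l ++ r) = (PySem.List.pyRange 0 5 1).map (fun i =>
      (PySem.List.pyGet? (pvSums l) i).getD 0 + (PySem.List.pyGet? (pvSums r) i).getD 0) := by
  simp [pvSums, pvRange5, PySem.List.pyGet?, PySem.List.pyIdx?]

lemma pvB_eq_aux (n : Nat) : ∀ rows : List (List Int), rows.length ≤ n →
    calculateTotalBinSales_alt rows = pvSums rows := by
  induction n with
  | zero =>
    intro rows h
    have : rows = [] := List.eq_nil_of_length_eq_zero (Nat.le_zero.mp h)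
    subst this
    simp [calculateTotalBinSales_alt, pvSums]
  | succ n ih =>
    intro rows h
    by_cases h0 : rows = []
    · subst h0; simp [calculateTotalBinSales_alt, pvSums]
    · by_cases h1 : rows.length = 1
      · obtain ⟨r, hr⟩ : ∃ r, rows = [r] := List.length_eq_one_iff.mp h1
        subst hr
        simp [calculateTotalBinSales_alt, pvSums, pvRange5, pvCol,
          PySem.List.pyGet?, PySem.List.pyIdx?]
      · rw [calculateTotalBinSales_alt]
        simp only [dif_neg h0, dif_neg h1]
        rw [PySem.List.slice_to_natCast, PySem.List.slice_from_natCast,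
          ih _ (by simp [List.length_take]; omega),
          ih _ (by simp [List.length_drop]; omega),
          ← pvSums_append, List.take_append_drop]

lemma pvB_eq (rows : List (List Int)) : calculateTotalBinSales_alt rows = pvSums rows :=
  pvB_eq_aux rows.length rows le_rfl

-- ===== VERDICT (by name: the statement is the Claim_ definition above) =====
theorem calculateTotalBinSales_spec : Claim_equal_calculateTotalBinSales := by
  intro devSeries _ _
  unfold Spec_calculateTotalBinSales
  rw [pvA_eq, pvB_eq]
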